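-- pv_equiv track=rewrite | github.com/SIIS-Sentinel/scheduler | src/trace_maker.py | get_prev_ts
-- ===== SOURCE A (Python) =====
-- from typing import List, Dict, Tuple, Optional
--
-- def get_prev_ts(ts: int, points: Dict[int, int]) -> Tuple[int, int]:
--     best_ts: Optional[int] = None
--     best_val: Optional[int] = None
--     for point in points:
--         if (best_ts is None or point > best_ts) and point < ts:
--             best_ts = point
--             best_val = points[point]
--     if best_ts is None or best_val is None:
--         raise KeyError(f"Previous value of {ts} not found.")
--     else:
--         return (best_ts, best_val)
-- ===== SOURCE B (Python) =====
-- def get_prev_ts(ts: int, points):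
--     for k in sorted(points, reverse=True):
--         if k < ts:
--             return (k, points[k])
--     raise KeyError(f"Previous value of {ts} not found.")
-- ===== Notes on version B (the rewrite author's own statement) =====
-- stated objective: alternative
-- what changed: Replaces A's single-pass running-max tracking of (best_ts, best_val) with sort-then-scan: sort the keys descending and return at the first key below ts.
import Mathlib
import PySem

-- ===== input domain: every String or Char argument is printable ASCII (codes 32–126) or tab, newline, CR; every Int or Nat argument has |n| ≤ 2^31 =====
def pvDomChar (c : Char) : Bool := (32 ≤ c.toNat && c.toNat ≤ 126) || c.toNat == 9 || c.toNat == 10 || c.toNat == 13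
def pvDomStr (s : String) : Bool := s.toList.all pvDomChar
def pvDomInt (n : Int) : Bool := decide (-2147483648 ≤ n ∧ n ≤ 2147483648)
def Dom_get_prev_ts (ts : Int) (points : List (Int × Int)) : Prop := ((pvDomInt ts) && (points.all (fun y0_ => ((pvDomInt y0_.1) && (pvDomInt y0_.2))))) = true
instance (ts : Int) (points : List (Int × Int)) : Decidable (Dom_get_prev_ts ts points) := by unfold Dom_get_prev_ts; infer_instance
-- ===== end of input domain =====

-- B replaces A's single-pass running-max tracking of (best_ts, best_val) by sort-then-scan:
-- sort the keys descending and return at the first key below ts (same result by a staged decomposition).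
-- `points` is a Python dict, ported as an association list read through PySem.Dict.

-- ===== PORT A =====
-- one step of A's `for point in points:` loop, carrying (best_ts, best_val)
def pvStepA (ts : Int) (d : PySem.Dict Int Int) (b : Option Int × Option Int) (point : Int) : Option Int × Option Int :=
  if ((match b.1 with | none => true | some t => decide (t < point)) && decide (point < ts)) = true
  then (some point, some (d.getD point 0))
  else b

def get_prev_ts (ts : Int) (points : List (Int × Int)) : Int × Int :=
  let d := PySem.Dict.ofList points
  match d.keys.foldl (pvStepA ts d) (none, none) with
  | (some t, some v) => (t, v)
  | _ => (0, 0)   -- Python raises KeyError here; excluded by Pre_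

-- ===== PORT B =====
def get_prev_ts_alt (ts : Int) (points : List (Int × Int)) : Int × Int :=
  let d := PySem.Dict.ofList points
  match (PySem.List.sorted d.keys (fun k => k) true).find? (fun k => decide (k < ts)) with
  | some k => (k, d.getD k 0)
  | none => (0, 0)   -- Python raises KeyError here; excluded by Pre_

-- ===== PRECONDITION & SPEC =====
-- Pre_ excludes exactly the inputs with no key below ts, on which both Pythons raise KeyError.
def Pre_get_prev_ts (ts : Int) (points : List (Int × Int)) : Prop := ∃ p ∈ points, p.1 < ts
instance (ts : Int) (points : List (Int × Int)) : Decidable (Pre_get_prev_ts ts points) := by unfold Pre_get_prev_ts; infer_instance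
def pvWitness_get_prev_ts : Int × (List (Int × Int)) := (5, [(1, 10), (3, 7)])

def Spec_get_prev_ts (ts : Int) (points : List (Int × Int)) (out : Int × Int) : Prop := out = get_prev_ts_alt ts points
instance (ts : Int) (points : List (Int × Int)) (out : Int × Int) : Decidable (Spec_get_prev_ts ts points out) := by unfold Spec_get_prev_ts; infer_instance

-- ===== CLAIM (what is proved, stated in full; the proofs are below) =====
def Claim_equal_get_prev_ts : Prop := ∀ (ts : Int) (points : List (Int × Int)), Dom_get_prev_ts ts points → Pre_get_prev_ts ts points → Spec_get_prev_ts ts points (get_prev_ts ts points)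

-- ===== LEMMAS AND PROOFS =====

-- A's loop state, projected to just the best key (the value slot is determined by the key)
def pvStepK (ts : Int) (o : Option Int) (point : Int) : Option Int :=
  if ((match o with | none => true | some t => decide (t < point)) && decide (point < ts)) = true
  then some point
  else o

def pvPair (d : PySem.Dict Int Int) (o : Option Int) : Option Int × Option Int :=
  match o with
  | none => (none, none)
  | some t => (some t, some (d.getD t 0))

lemma foldA_eq_pair (ts : Int) (d : PySem.Dict Int Int) :
    ∀ (l : List Int) (o : Option Int),
      l.foldl (pvStepA ts d) (pvPair d o) = pvPair d (l.foldl (pvStepK ts) o) := by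
  intro l
  induction l with
  | nil => intro o; rfl
  | cons p t ih =>
    intro o
    have hstep : pvStepA ts d (pvPair d o) p = pvPair d (pvStepK ts o p) := by
      cases o with
      | none => simp [pvStepA, pvStepK, pvPair]; split_ifs <;> rfl
      | some a => simp [pvStepA, pvStepK, pvPair]; split_ifs <;> rfl
    simp [List.foldl_cons, hstep, ih]

lemma foldK_some (ts : Int) :
    ∀ (l : List Int) (a : Int),
      l.foldl (pvStepK ts) (some a) = some ((l.filter (fun k => decide (k < ts))).foldl max a) := by
  intro l
  induction l with
  | nil => intro a; rfl
  | cons p t ih =>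
    intro a
    by_cases hp : p < ts
    · by_cases ha : a < p
      · simp [pvStepK, hp, ha, ih, max_eq_right ha.le]
      · simp [pvStepK, hp, ha, ih, max_eq_left (not_lt.mp ha)]
    · simp [pvStepK, hp, ih]

lemma foldK_none (ts : Int) (l : List Int) :
    l.foldl (pvStepK ts) none =
      (match l.filter (fun k => decide (k < ts)) with
       | [] => none
       | h :: t => some (t.foldl max h)) := by
  induction l with
  | nil => rfl
  | cons p t ih =>
    by_cases hp : p < ts
    · simp [pvStepK, hp, foldK_some]
    · simp [pvStepK, hp, ih]

lemma mem_keys_ofList (l : List (Int × Int)) (k : Int) :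
    k ∈ (PySem.Dict.ofList l).keys ↔ k ∈ l.map Prod.fst := by
  simp [PySem.Dict.ofList, PySem.Dict.update, PySem.Dict.keys_foldl_insert_key, PySem.Set.mem_update]

-- `find?` is the head of the filtered list
lemma find?_eq_head?_filter {α : Type} (p : α → Bool) :
    ∀ (l : List α), l.find? p = (l.filter p).head? := by
  intro l
  induction l with
  | nil => rfl
  | cons x t ih =>
    cases hx : p x with
    | true => simp [List.find?_cons_of_pos hx, List.filter_cons_of_pos hx]
    | false =>
      rw [List.find?_cons_of_neg (by simp [hx]), List.filter_cons_of_neg (by simp [hx]), ih]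

-- the head of a descending list permuted from `cands` is the running max of `cands`
lemma head_desc_eq_foldl_max (cands : List Int) (h : Int) (t : List Int)
    (f : List Int) (hperm : f.Perm (h :: t))
    (hdesc : f.Pairwise (fun a b => b ≤ a)) :
    f.head? = some (t.foldl max h) := by
  set m := t.foldl max h with hm
  have hmmem : m ∈ h :: t := by
    rcases PySem.List.foldl_max_mem t h with h1 | h1
    · rw [hm, h1]; exact List.mem_cons_self
    · exact List.mem_cons_of_mem _ h1
  have hmax : ∀ y ∈ h :: t, y ≤ m := by
    intro y hy
    rcases List.mem_cons.mp hy with rfl | hy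
    · exact (PySem.List.le_foldl_max t y).1
    · exact (PySem.List.le_foldl_max t h).2 y hy
  cases hf : f with
  | nil =>
    exfalso
    have := hperm.length_eq
    simp [hf] at this
  | cons a s =>
    have hamem : a ∈ h :: t := hperm.mem_iff.mp (by simp [hf])
    have hml : m ∈ f := hperm.mem_iff.mpr hmmem
    have ham : a ≤ m := hmax a hamem
    have hma : m ≤ a := by
      rcases List.mem_cons.mp (hf ▸ hml) with rfl | hms
      · exact le_refl _
      · exact (List.pairwise_cons.mp (hf ▸ hdesc)).1 m hms
    simp [le_antisymm ham hma]

-- ===== VERDICT (by name: the statement is the Claim_ definition above) =====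
theorem get_prev_ts_spec : Claim_equal_get_prev_ts := by
  intro ts points _ hpre
  unfold Spec_get_prev_ts get_prev_ts get_prev_ts_alt
  obtain ⟨p, hp, hlt⟩ := hpre
  set d := PySem.Dict.ofList points with hd
  set cands := d.keys.filter (fun k => decide (k < ts)) with hc
  have hmem : p.1 ∈ cands := by
    rw [hc, List.mem_filter]
    exact ⟨(mem_keys_ofList points p.1).mpr (List.mem_map_of_mem hp), by simpa using hlt⟩
  obtain ⟨h, t, hct⟩ : ∃ h t, cands = h :: t := by
    cases hcc : cands with
    | nil => rw [hcc] at hmem; cases hmem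
    | cons h t => exact ⟨h, t, rfl⟩
  have hA : d.keys.foldl (pvStepA ts d) (none, none) = pvPair d (some (t.foldl max h)) := by
    have := foldA_eq_pair ts d d.keys none
    rw [show ((none, none) : Option Int × Option Int) = pvPair d none from rfl, this,
        foldK_none, ← hc, hct]
  have hB : (PySem.List.sorted d.keys (fun k => k) true).find? (fun k => decide (k < ts))
      = some (t.foldl max h) := by
    rw [find?_eq_head?_filter]
    apply head_desc_eq_foldl_max cands h t
    · rw [← hct, hc]
      exact (PySem.List.sorted_perm d.keys (fun k => k) true).filter _
    · exact (PySem.List.sorted_pairwise_rev d.keys (fun k => k)).filter _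
  simp [hA, hB, pvPair]
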